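-- pv_equiv track=rewrite | github.com/objhub/polyscript-python | src/polyscript/parser.py | _extract_param_annotations
-- ===== SOURCE A (Python) =====
-- def _extract_param_annotations(source: str) -> tuple[str, dict[int, str]]:
--     """Extract @param annotation lines from source before Lark parsing.
--
--     Returns:
--         A tuple of (cleaned_source, annotations_by_line) where
--         annotations_by_line maps the 0-based line index of the *next*
--         statement to the raw @param text (everything after '@param ').
--     """
--     lines = source.split("\n")
--     cleaned_lines: list[str] = []
--     annotations: dict[int, str] = {}
--     pending_param: str | None = None
--
--     for line in lines:
--         stripped = line.strip()
--         if stripped.startswith("@param"):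
--             # Extract the raw text after @param
--             raw = stripped[len("@param"):].strip()
--             pending_param = raw
--             # Replace @param line with blank to preserve line count concept
--             # but for Lark we just skip it
--             cleaned_lines.append("")
--         else:
--             if pending_param is not None:
--                 # The cleaned line index for the next statement
--                 annotations[len(cleaned_lines)] = pending_param
--                 pending_param = None
--             cleaned_lines.append(line)
--
--     return "\n".join(cleaned_lines), annotations
-- ===== SOURCE B (Python) =====
-- def _extract_param_annotations(source: str) -> tuple[str, dict[int, str]]:
--     lines = source.split("\n")
--     cleaned = ["" if l.strip().startswith("@param") else l for l in lines]
--     annotations = {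
--         j: prev.strip()[len("@param"):].strip()
--         for j, (prev, cur) in enumerate(zip(lines, lines[1:]), start=1)
--         if prev.strip().startswith("@param") and not cur.strip().startswith("@param")
--     }
--     return "\n".join(cleaned), annotations
-- ===== Notes on version B (the rewrite author's own statement) =====
-- stated objective: simpler
-- what changed: Replaces A's stateful single pass carrying a pending_param variable with a stateless decomposition: a list comprehension blanks @param lines, and a dict comprehension over enumerate(zip(lines, lines[1:])) keys each annotation by the index of the first non-@param line after an @param line.
import Mathlib
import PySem

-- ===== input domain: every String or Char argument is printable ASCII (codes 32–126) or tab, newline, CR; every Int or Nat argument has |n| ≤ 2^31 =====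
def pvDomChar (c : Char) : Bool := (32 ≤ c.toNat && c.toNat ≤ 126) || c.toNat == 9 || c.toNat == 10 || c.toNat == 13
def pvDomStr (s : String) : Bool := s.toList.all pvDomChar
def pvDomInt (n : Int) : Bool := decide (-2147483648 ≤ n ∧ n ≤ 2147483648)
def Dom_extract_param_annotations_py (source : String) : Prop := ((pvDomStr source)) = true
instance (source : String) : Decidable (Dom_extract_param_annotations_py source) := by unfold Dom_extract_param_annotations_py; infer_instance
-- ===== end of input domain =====

-- B replaces A's carried `pending_param` state by a stateless decomposition: a map for the
-- cleaned lines plus a one-shot dict comprehension over consecutive line pairs (simpler).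

-- ===== PORT A =====
-- state: (cleaned_lines, annotations, pending_param)
def pvStepA (st : List String × PySem.Dict Int String × Option String) (line : String) :
    List String × PySem.Dict Int String × Option String :=
  let stripped := PySem.Str.strip line
  if PySem.Str.startswith stripped "@param" then
    let raw := PySem.Str.strip (PySem.Str.slice stripped (some 6) none)
    (st.1 ++ [""], st.2.1, some raw)
  else
    match st.2.2 with
    | some v => (st.1 ++ [line], st.2.1.insert (st.1.length : Int) v, none)
    | none => (st.1 ++ [line], st.2.1, none)

def extract_param_annotations_py (source : String) : String × (List (Int × String)) :=
  let lines := (PySem.Str.split? source "\n").getD []   -- sep "\n" ≠ "", so split? is always `some`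
  let st := lines.foldl pvStepA ([], PySem.Dict.empty, none)
  (PySem.Str.join "\n" st.1, st.2.1.items)

-- ===== PORT B =====
def pvIsParamB (l : String) : Bool := PySem.Str.startswith (PySem.Str.strip l) "@param"

def pvRawB (l : String) : String :=
  PySem.Str.strip (PySem.Str.slice (PySem.Str.strip l) (some 6) none)

def extract_param_annotations_py_alt (source : String) : String × (List (Int × String)) :=
  let lines := (PySem.Str.split? source "\n").getD []   -- sep "\n" ≠ "", so split? is always `some`
  let cleaned := lines.map (fun l => if pvIsParamB l then "" else l)
  -- dict comprehension over enumerate(zip(lines, lines[1:]), start=1) with its filter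
  let annotations :=
    ((PySem.List.enumerate (lines.zip (PySem.List.slice lines (some 1) none)) 1).filter
        (fun p => pvIsParamB p.2.1 && !pvIsParamB p.2.2)).foldl
      (fun d p => d.insert p.1 (pvRawB p.2.1)) PySem.Dict.empty
  (PySem.Str.join "\n" cleaned, annotations.items)

-- ===== PRECONDITION & SPEC =====
def Spec_extract_param_annotations_py (source : String) (out : String × (List (Int × String))) : Prop := out = extract_param_annotations_py_alt source
instance (source : String) (out : String × (List (Int × String))) : Decidable (Spec_extract_param_annotations_py source out) := by unfold Spec_extract_param_annotations_py; infer_instance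

-- ===== CLAIM (what is proved, stated in full; the proofs are below) =====
def Claim_equal_extract_param_annotations_py : Prop := ∀ (source : String), Dom_extract_param_annotations_py source → Spec_extract_param_annotations_py source (extract_param_annotations_py source)

-- ===== LEMMAS AND PROOFS =====

-- the annotation pairs A's loop appends when started at cleaned-length k with pending p
def pvAnnPairs : Int → Option String → List String → List (Int × String)
  | _, _, [] => []
  | k, p, l :: ls =>
    if pvIsParamB l then pvAnnPairs (k + 1) (some (pvRawB l)) ls
    else (match p with | some v => [(k, v)] | none => []) ++ pvAnnPairs (k + 1) none ls

lemma pvFoldA (ls : List String) (c : List String) (d : PySem.Dict Int String)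
    (p : Option String) (hd : ∀ kv ∈ d.items, kv.1 < (c.length : Int)) :
    (ls.foldl pvStepA (c, d, p)).1 = c ++ ls.map (fun l => if pvIsParamB l then "" else l) ∧
    (ls.foldl pvStepA (c, d, p)).2.1.items = d.items ++ pvAnnPairs (c.length : Int) p ls := by
  induction ls generalizing c d p with
  | nil => simp [pvAnnPairs]
  | cons l ls ih =>
    simp only [List.foldl_cons]
    by_cases hP : pvIsParamB l
    · have hstep : pvStepA (c, d, p) l = (c ++ [""], d, some (pvRawB l)) := by
        simp [pvStepA, pvIsParamB, pvRawB] at hP ⊢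
        simp [hP]
      rw [hstep]
      have hd' : ∀ kv ∈ d.items, kv.1 < ((c ++ [""]).length : Int) := by
        intro kv hkv; have := hd kv hkv; simp; omega
      obtain ⟨h1, h2⟩ := ih (c ++ [""]) d (some (pvRawB l)) hd'
      refine ⟨?_, ?_⟩
      · rw [h1]; simp [hP]
      · rw [h2]; simp [pvAnnPairs, hP]
    · have hfresh : d.contains ((c.length : Int)) = false := by
        by_contra hcon
        have : d.contains ((c.length : Int)) = true := by
          cases h : d.contains ((c.length : Int)) <;> simp_all
        rw [PySem.Dict.contains_iff_mem_keys] at this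
        simp only [PySem.Dict.keys, List.mem_map] at this
        obtain ⟨kv, hkv, hfst⟩ := this
        have := hd kv hkv; omega
      cases p with
      | some v =>
        have hstep : pvStepA (c, d, some v) l = (c ++ [l], d.insert (c.length : Int) v, none) := by
          simp [pvStepA, pvIsParamB] at hP ⊢; simp [hP]
        rw [hstep]
        have hins := PySem.Dict.items_insert_of_not_contains d v hfresh
        have hd' : ∀ kv ∈ (d.insert (c.length : Int) v).items, kv.1 < ((c ++ [l]).length : Int) := by
          intro kv hkv
          rw [hins] at hkv
          simp at hkv ⊢
          rcases hkv with h | h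
          · have := hd kv h; omega
          · simp [h]
        obtain ⟨h1, h2⟩ := ih (c ++ [l]) _ none hd'
        refine ⟨?_, ?_⟩
        · rw [h1]; simp [hP]
        · rw [h2, hins]; simp [pvAnnPairs, hP]
      | none =>
        have hstep : pvStepA (c, d, none) l = (c ++ [l], d, none) := by
          simp [pvStepA, pvIsParamB] at hP ⊢; simp [hP]
        rw [hstep]
        have hd' : ∀ kv ∈ d.items, kv.1 < ((c ++ [l]).length : Int) := by
          intro kv hkv; have := hd kv hkv; simp; omega
        obtain ⟨h1, h2⟩ := ih (c ++ [l]) d none hd'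
        refine ⟨?_, ?_⟩
        · rw [h1]; simp [hP]
        · rw [h2]; simp [pvAnnPairs, hP]

lemma pvBridge (ls : List String) (prev : String) (k : Int) :
    pvAnnPairs k (if pvIsParamB prev then some (pvRawB prev) else none) ls
      = ((PySem.List.enumerate ((prev :: ls).zip ls) k).filter
          (fun p => pvIsParamB p.2.1 && !pvIsParamB p.2.2)).map
          (fun p => (p.1, pvRawB p.2.1)) := by
  induction ls generalizing prev k with
  | nil => simp [pvAnnPairs]
  | cons cur ls ih =>
    have hz : (prev :: cur :: ls).zip (cur :: ls) = (prev, cur) :: (cur :: ls).zip ls := by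
      simp [List.zip]
    rw [hz, PySem.List.enumerate_cons]
    by_cases hc : pvIsParamB cur
    · simp only [pvAnnPairs, hc, if_true]
      have := ih cur (k + 1)
      rw [if_pos hc] at this
      rw [this]
      simp [hc]
    · simp only [pvAnnPairs, hc]
      have := ih cur (k + 1)
      rw [if_neg hc] at this
      rw [this]
      by_cases hprev : pvIsParamB prev
      · simp [hprev, hc]
      · simp [hprev, hc]

lemma pvNodupKeys (ls : List (String × String)) (k : Int)
    (pr : (Int × String × String) → Bool) :
    (((PySem.List.enumerate ls k).filter pr).map (·.1)).Nodup := by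
  have h1 := PySem.List.pairwise_lt_enumerate ls k
  have h2 : ((PySem.List.enumerate ls k).filter pr).Pairwise (fun p q => p.1 < q.1) :=
    List.Pairwise.sublist List.filter_sublist h1
  have h3 : (((PySem.List.enumerate ls k).filter pr).map (·.1)).Pairwise (· < ·) := by
    rw [List.pairwise_map]; exact h2
  exact h3.imp (fun h => ne_of_lt h)

lemma pvMain (lines : List String) :
    ((lines.foldl pvStepA ([], PySem.Dict.empty, none)).1,
      (lines.foldl pvStepA ([], PySem.Dict.empty, none)).2.1.items)
    = (lines.map (fun l => if pvIsParamB l then "" else l),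
       (((PySem.List.enumerate (lines.zip (PySem.List.slice lines (some 1) none)) 1).filter
          (fun p => pvIsParamB p.2.1 && !pvIsParamB p.2.2)).foldl
        (fun d p => d.insert p.1 (pvRawB p.2.1)) PySem.Dict.empty).items) := by
  cases lines with
  | nil =>
    simp [PySem.Dict.empty]
  | cons h t =>
    rw [PySem.List.slice_from_one]
    simp only [List.tail_cons]
    have hfold := PySem.Dict.items_foldl_insert_fresh
        ((PySem.List.enumerate ((h :: t).zip t) 1).filter
            (fun p => pvIsParamB p.2.1 && !pvIsParamB p.2.2))
        (fun p => p.1) (fun p => pvRawB p.2.1) PySem.Dict.empty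
        (by intro a _; exact PySem.Dict.contains_empty _)
        (pvNodupKeys _ 1 _)
    obtain ⟨h1, h2⟩ := pvFoldA t [if pvIsParamB h then "" else h] PySem.Dict.empty
      (if pvIsParamB h then some (pvRawB h) else none)
      (by intro kv hkv; simp [PySem.Dict.empty] at hkv)
    have hstep : pvStepA ([], PySem.Dict.empty, none) h
        = ([if pvIsParamB h then "" else h], PySem.Dict.empty,
           if pvIsParamB h then some (pvRawB h) else none) := by
      by_cases hp : pvIsParamB h
      · simp [pvStepA, pvIsParamB, pvRawB] at hp ⊢; simp [hp]
      · simp [pvStepA, pvIsParamB] at hp ⊢; simp [hp]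
    rw [List.foldl_cons, hstep]
    refine Prod.ext ?_ ?_
    · rw [h1]; simp
    · rw [h2]
      have hb := pvBridge t h 1
      simp only [List.length_cons, List.length_nil, hfold]
      simp [PySem.Dict.empty]
      exact hb

-- ===== VERDICT (by name: the statement is the Claim_ definition above) =====
theorem extract_param_annotations_py_spec : Claim_equal_extract_param_annotations_py := by
  intro source _
  unfold Spec_extract_param_annotations_py extract_param_annotations_py extract_param_annotations_py_alt
  have := pvMain ((PySem.Str.split? source "\n").getD [])
  simp only [Prod.mk.injEq] at this ⊢
  exact ⟨by rw [this.1], by rw [this.2]⟩
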